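-- pv_equiv track=rewrite | github.com/Ishmam-Zahin/DIP_LAB | old/hw11.py | tile_grid_indices
-- ===== SOURCE A (Python) =====
-- def tile_grid_indices(h, w, s):
--     th, tw = h // s, w // s
--     heights = [th] * s
--     widths = [tw] * s
--     for i in range(h - th * s):
--         heights[s - 1 - i] += 1
--     for j in range(w - tw * s):
--         widths[s - 1 - j] += 1
--     row_starts = [0]
--     for ht in heights[:-1]:
--         row_starts.append(row_starts[-1] + ht)
--     col_starts = [0]
--     for wd in widths[:-1]:
--         col_starts.append(col_starts[-1] + wd)
--     return heights, widths, row_starts, col_starts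
-- ===== SOURCE B (Python) =====
-- def tile_grid_indices(h, w, s):
--     th, tw = h // s, w // s
--     rem_h, rem_w = h - th * s, w - tw * s
--     heights = [th + (i >= s - rem_h) for i in range(s)]
--     widths = [tw + (j >= s - rem_w) for j in range(s)]
--     row_starts = [0] + [i * th + max(0, i - (s - rem_h)) for i in range(1, s)]
--     col_starts = [0] + [j * tw + max(0, j - (s - rem_w)) for j in range(1, s)]
--     return heights, widths, row_starts, col_starts
-- ===== Notes on version B (the rewrite author's own statement) =====
-- stated objective: alternative
-- what changed: Replaces A's in-place increment loop over the tail of a replicated list and the two running prefix-sum accumulation loops by direct per-index closed-form comprehensions (size = base + end-loaded indicator, start = i*base + max(0, i-(s-rem))).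
import Mathlib
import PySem

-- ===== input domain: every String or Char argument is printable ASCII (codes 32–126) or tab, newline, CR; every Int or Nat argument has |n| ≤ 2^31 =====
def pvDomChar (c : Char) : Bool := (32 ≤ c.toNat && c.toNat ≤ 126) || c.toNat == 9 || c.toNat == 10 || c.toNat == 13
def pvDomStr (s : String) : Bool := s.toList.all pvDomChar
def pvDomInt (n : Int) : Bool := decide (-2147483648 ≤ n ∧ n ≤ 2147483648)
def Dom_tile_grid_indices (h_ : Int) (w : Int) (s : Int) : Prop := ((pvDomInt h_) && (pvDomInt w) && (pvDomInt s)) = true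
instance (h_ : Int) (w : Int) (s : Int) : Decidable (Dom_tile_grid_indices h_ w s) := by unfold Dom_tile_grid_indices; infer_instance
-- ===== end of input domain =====

-- B replaces A's in-place remainder distribution and running prefix-sum loops by per-index
-- closed-form comprehensions (same values, different decomposition; no speed claim).

-- ===== PORT A =====
-- heights[s-1-i] += 1 : whenever the loop body runs, s-1-i is a nonnegative in-range index,
-- so List.modify at (s-1-i).toNat is exact; row_starts[-1] reads the last element of an
-- always-nonempty list, so getLastD 0 is exact.
def tile_grid_indices (h_ : Int) (w : Int) (s : Int) : List Int × List Int × List Int × List Int :=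
  let th := PySem.Int.floordiv h_ s
  let tw := PySem.Int.floordiv w s
  let heights0 := List.replicate s.toNat th
  let widths0 := List.replicate s.toNat tw
  let heights := (PySem.List.pyRange 0 (h_ - th * s) 1).foldl
    (fun hs i => hs.modify (s - 1 - i).toNat (· + 1)) heights0
  let widths := (PySem.List.pyRange 0 (w - tw * s) 1).foldl
    (fun ws j => ws.modify (s - 1 - j).toNat (· + 1)) widths0
  let row_starts := (PySem.List.slice heights none (some (-1))).foldl
    (fun rs ht => rs ++ [rs.getLastD 0 + ht]) [0]
  let col_starts := (PySem.List.slice widths none (some (-1))).foldl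
    (fun cs wd => cs ++ [cs.getLastD 0 + wd]) [0]
  (heights, widths, row_starts, col_starts)

-- ===== PORT B =====
def tile_grid_indices_alt (h_ : Int) (w : Int) (s : Int) : List Int × List Int × List Int × List Int :=
  let th := PySem.Int.floordiv h_ s
  let tw := PySem.Int.floordiv w s
  let remH := h_ - th * s
  let remW := w - tw * s
  let heights := (PySem.List.pyRange 0 s 1).map (fun i => th + (if i ≥ s - remH then (1:Int) else 0))
  let widths := (PySem.List.pyRange 0 s 1).map (fun j => tw + (if j ≥ s - remW then (1:Int) else 0))
  let row_starts := 0 :: (PySem.List.pyRange 1 s 1).map (fun i => i * th + max 0 (i - (s - remH)))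
  let col_starts := 0 :: (PySem.List.pyRange 1 s 1).map (fun j => j * tw + max 0 (j - (s - remW)))
  (heights, widths, row_starts, col_starts)

-- ===== PRECONDITION & SPEC =====
-- A raises ZeroDivisionError iff s = 0; everywhere else it returns.
def Pre_tile_grid_indices (h_ : Int) (w : Int) (s : Int) : Prop := s ≠ 0
instance (h_ : Int) (w : Int) (s : Int) : Decidable (Pre_tile_grid_indices h_ w s) := by
  unfold Pre_tile_grid_indices; infer_instance
def pvWitness_tile_grid_indices : Int × Int × Int := (7, 5, 3)
def Spec_tile_grid_indices (h_ : Int) (w : Int) (s : Int) (out : List Int × List Int × List Int × List Int) : Prop := out = tile_grid_indices_alt h_ w s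
instance (h_ : Int) (w : Int) (s : Int) (out : List Int × List Int × List Int × List Int) : Decidable (Spec_tile_grid_indices h_ w s out) := by unfold Spec_tile_grid_indices; infer_instance

-- ===== CLAIM (what is proved, stated in full; the proofs are below) =====
def Claim_equal_tile_grid_indices : Prop := ∀ (h_ : Int) (w : Int) (s : Int), Dom_tile_grid_indices h_ w s → Pre_tile_grid_indices h_ w s → Spec_tile_grid_indices h_ w s (tile_grid_indices h_ w s)

-- ===== LEMMAS AND PROOFS =====

-- the fold of in-place increments preserves the length
theorem pv_len_foldl_modify (is : List Int) (g : Int → Nat) (l : List Int) :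
    (is.foldl (fun l i => l.modify (g i) (· + 1)) l).length = l.length := by
  induction is generalizing l with
  | nil => rfl
  | cons a is ih => simpa [List.foldl_cons] using (ih (l.modify (g a) (· + 1))).trans (by simp)

-- element k of the fold of increments = original + number of hits at k
theorem pv_getD_foldl_modify (is : List Int) (g : Int → Nat) :
    ∀ (l : List Int) (k : Nat), k < l.length →
    (is.foldl (fun l i => l.modify (g i) (· + 1)) l).getD k 0
      = l.getD k 0 + (is.countP (fun i => g i == k) : Int) := by
  induction is with
  | nil => intro l k hk; simp
  | cons a is ih =>
    intro l k hk
    have hlen : k < (l.modify (g a) (· + 1)).length := by simpa using hk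
    rw [List.foldl_cons, ih _ k hlen, List.countP_cons]
    have h1 : (l.modify (g a) (· + 1)).getD k 0 = if g a = k then l.getD k 0 + 1 else l.getD k 0 := by
      rw [List.getD_eq_getElem _ _ hlen, List.getD_eq_getElem _ _ hk, List.getElem_modify]
    rw [h1]
    by_cases h : g a = k
    · rw [if_pos h, if_pos (by simp [h])]
      push_cast; ring
    · rw [if_neg h, if_neg (by simp [h])]
      push_cast; ring

-- how many i in range(r) satisfy (n-1-i) = k
theorem pv_count_hits (n : Nat) : ∀ (r k : Nat), r ≤ n → k < n →
    (PySem.List.pyRange 0 (r : Int) 1).countP (fun i => ((n : Int) - 1 - i).toNat == k)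
      = if n - r ≤ k then 1 else 0 := by
  intro r
  induction r with
  | zero =>
    intro k _ hk
    rw [PySem.List.pyRange_one_eq_nil (by omega)]
    rw [List.countP_nil, if_neg (by omega)]
  | succ r ih =>
    intro k hr hk
    have h1 : ((r : Nat) + 1 : Nat) = ((r : Int) + 1).toNat := by omega
    have h2 : PySem.List.pyRange 0 ((r : Nat) + 1 : Nat) 1
        = PySem.List.pyRange 0 (r : Int) 1 ++ [(r : Int)] := by
      push_cast
      exact PySem.List.pyRange_one_succ_right (by omega)
    rw [h2, List.countP_append, ih k (by omega) hk]
    have h3 : ((n : Int) - 1 - (r : Int)).toNat = n - 1 - r := by omega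
    have h4 : List.countP (fun i => ((n : Int) - 1 - i).toNat == k) [(r : Int)]
        = if n - 1 - r = k then 1 else 0 := by
      simp [List.countP_cons, h3]
    rw [h4]
    split_ifs <;> omega

-- sum of the closed-form tile sizes over range(k)
theorem pv_sum_sizes (th c : Int) (hc : 0 ≤ c) : ∀ (k : Nat),
    ((PySem.List.pyRange 0 (k : Int) 1).map (fun i => th + if c ≤ i then (1:Int) else 0)).sum
      = (k : Int) * th + max 0 ((k : Int) - c) := by
  intro k
  induction k with
  | zero =>
    rw [PySem.List.pyRange_one_eq_nil (by omega)]
    simp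
    omega
  | succ k ih =>
    have h2 : PySem.List.pyRange 0 ((k : Nat) + 1 : Nat) 1
        = PySem.List.pyRange 0 (k : Int) 1 ++ [(k : Int)] := by
      push_cast
      exact PySem.List.pyRange_one_succ_right (by omega)
    rw [h2, List.map_append, List.sum_append, ih]
    have hsingle : (List.map (fun i => th + if c ≤ i then (1:Int) else 0) [(k : Int)]).sum
        = th + if c ≤ (k : Int) then (1:Int) else 0 := by simp
    rw [hsingle]
    push_cast
    by_cases h : c ≤ (k : Int)
    · rw [if_pos h, max_eq_right (by omega), max_eq_right (by omega)]; ring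
    · rw [if_neg h, max_eq_left (by omega), max_eq_left (by omega)]; ring

-- A's heights loop = B's closed-form heights (th = h//s, rem = h - th*s)
theorem pv_heights_eq (th rem s : Int) (hs : 0 < s) (h0 : 0 ≤ rem) (h1 : rem < s) :
    (PySem.List.pyRange 0 rem 1).foldl
      (fun hs i => hs.modify (s - 1 - i).toNat (· + 1))
      (List.replicate s.toNat th)
    = (PySem.List.pyRange 0 s 1).map (fun i => th + (if i ≥ s - rem then (1:Int) else 0)) := by
  obtain ⟨n, rfl⟩ : ∃ n : Nat, s = (n : Int) := ⟨s.toNat, by omega⟩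
  obtain ⟨r, rfl⟩ : ∃ r : Nat, rem = (r : Int) := ⟨rem.toNat, by omega⟩
  have hle : r ≤ n := by omega
  apply List.ext_getElem
  · rw [pv_len_foldl_modify]
    simp [PySem.List.length_pyRange_one]
  · intro k hk1 hk2
    have hkn : k < n := by
      rw [pv_len_foldl_modify] at hk1; simpa using hk1
    have hklen : k < (List.replicate ((n : Int)).toNat th).length := by simpa using hkn
    rw [← List.getD_eq_getElem _ 0 hk1, ← List.getD_eq_getElem _ 0 hk2]
    rw [pv_getD_foldl_modify _ _ _ k hklen, pv_count_hits n r k hle hkn]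
    have hgd : (List.replicate ((n : Int)).toNat th).getD k 0 = th := by
      rw [List.getD_eq_getElem _ 0 hklen]; simp
    rw [hgd, List.getD_eq_getElem _ 0 hk2, List.getElem_map]
    have hklen2 : k < (PySem.List.pyRange 0 (n : Int) 1).length := by
      simpa using hk2
    have hidx : (PySem.List.pyRange 0 (n : Int) 1)[k]'hklen2 = 0 + (k : Int) :=
      PySem.List.getElem_pyRange_one ..
    rw [hidx]
    by_cases h : n - r ≤ k
    · rw [if_pos h, if_pos (by omega)]
      push_cast; ring
    · rw [if_neg h, if_neg (by omega)]
      push_cast; ring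

-- the prefix-sum loop, with explicit accumulator
theorem pv_fold_starts (xs : List Int) : ∀ (rs : List Int) (b : Int),
    xs.foldl (fun rs x => rs ++ [rs.getLastD 0 + x]) (rs ++ [b])
      = rs ++ (List.range (xs.length + 1)).map (fun k => b + (xs.take k).sum) := by
  induction xs with
  | nil => intro rs b; simp
  | cons x xs ih =>
    intro rs b
    rw [List.foldl_cons]
    have hlast : (rs ++ [b]).getLastD 0 = b := by simp
    rw [hlast]
    have : rs ++ [b] ++ [b + x] = (rs ++ [b]) ++ [b + x] := by simp
    rw [this, ih (rs ++ [b]) (b + x)]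
    have h5 : (x :: xs).length + 1 = (xs.length + 1) + 1 := rfl
    rw [h5, List.range_succ_eq_map, List.range_succ_eq_map]
    simp [List.range_succ_eq_map, List.map_map, Function.comp_def, List.take_succ_cons, add_assoc]

-- A's running-sum starts over the closed-form sizes = B's closed-form starts
theorem pv_starts_eq (th rem s : Int) (hs : 0 < s) (h0 : 0 ≤ rem) (h1 : rem < s) :
    (((PySem.List.pyRange 0 s 1).map (fun i => th + (if i ≥ s - rem then (1:Int) else 0))).dropLast).foldl
      (fun rs x => rs ++ [rs.getLastD 0 + x]) [0]
    = 0 :: (PySem.List.pyRange 1 s 1).map (fun i => i * th + max 0 (i - (s - rem))) := by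
  obtain ⟨n, rfl⟩ : ∃ n : Nat, s = (n : Int) := ⟨s.toNat, by omega⟩
  have hn1 : 1 ≤ n := by omega
  set H := (PySem.List.pyRange 0 ((n : Nat) : Int) 1).map
    (fun i => th + (if i ≥ (n : Int) - rem then (1:Int) else 0)) with hH
  have hHlen : H.length = n := by
    rw [hH, List.length_map, PySem.List.length_pyRange_one]; omega
  have hDlen : H.dropLast.length = n - 1 := by rw [List.length_dropLast, hHlen]
  have hinit : ([0] : List Int) = [] ++ [0] := by simp
  rw [hinit, pv_fold_starts, List.nil_append, hDlen]
  have htake : ∀ k : Nat, k < n →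
      (H.dropLast.take k).sum = (k : Int) * th + max 0 ((k : Int) - ((n : Int) - rem)) := by
    intro k hk
    have ht1 : H.dropLast.take k = H.take k := by
      have hmin : min k (H.length - 1) = k := by rw [hHlen]; omega
      rw [List.dropLast_eq_take, List.take_take, hmin]
    have ht2 : H.take k = (PySem.List.pyRange 0 (k : Int) 1).map
        (fun i => th + (if i ≥ (n : Int) - rem then (1:Int) else 0)) := by
      have htk : List.take k (PySem.List.pyRange 0 ((n : Nat) : Int) 1)
          = PySem.List.pyRange 0 (k : Int) 1 := by
        rw [PySem.List.pyRange_one, PySem.List.pyRange_one, ← List.map_take, List.take_range]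
        have hmn : min k (((n : Int) - 0).toNat) = (((k : Nat) : Int) - 0).toNat := by omega
        rw [hmn]
      rw [hH, ← List.map_take, htk]
    rw [ht1, ht2]
    have := pv_sum_sizes th ((n : Int) - rem) (by omega) k
    simpa [ge_iff_le] using this
  apply List.ext_getElem
  · rw [List.length_map, List.length_range, List.length_cons,
        List.length_map, PySem.List.length_pyRange_one]
    omega
  · intro k hk1 hk2
    have hkn : k < n := by
      rw [List.length_map, List.length_range] at hk1; omega
    rw [List.getElem_map, List.getElem_range]
    match k, hk2 with
    | 0, _ =>
      rw [List.getElem_cons_zero]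
      simp
    | k + 1, hk2 =>
      rw [List.getElem_cons_succ, List.getElem_map]
      have hklen2 : k < (PySem.List.pyRange 1 (n : Int) 1).length := by
        rw [List.length_cons, List.length_map] at hk2; omega
      have hidx : (PySem.List.pyRange 1 (n : Int) 1)[k]'hklen2 = 1 + (k : Int) :=
        PySem.List.getElem_pyRange_one ..
      rw [hidx, htake (k + 1) hkn, zero_add]
      have hc : (1 : Int) + (k : Int) = ((k : Nat) + 1 : Nat) := by push_cast; ring
      rw [hc]

-- empty case: negative s
theorem pv_rem_nonpos (a s : Int) (hs : s < 0) : a - PySem.Int.floordiv a s * s ≤ 0 := by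
  have hmod : a - PySem.Int.floordiv a s * s = PySem.Int.mod a s := by
    have := PySem.Int.floordiv_mul_add_mod a s
    omega
  have h1 : PySem.Int.mod a s = - PySem.Int.mod (-a) (-s) := by
    have h2 := PySem.Int.mod_neg_neg (-a) (-s)
    rw [neg_neg, neg_neg] at h2
    omega
  have h2 : 0 ≤ PySem.Int.mod (-a) (-s) := by
    rw [PySem.Int.mod_eq_emod_of_pos (by omega)]
    exact Int.emod_nonneg _ (by omega)
  omega

theorem pv_rem_bounds (a s : Int) (hs : 0 < s) :
    0 ≤ a - PySem.Int.floordiv a s * s ∧ a - PySem.Int.floordiv a s * s < s := by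
  have hmod : a - PySem.Int.floordiv a s * s = PySem.Int.mod a s := by
    have := PySem.Int.floordiv_mul_add_mod a s
    omega
  rw [hmod, PySem.Int.mod_eq_emod_of_pos hs]
  exact ⟨Int.emod_nonneg a (by omega), Int.emod_lt_of_pos a hs⟩

-- ===== VERDICT (by name: the statement is the Claim_ definition above) =====
theorem tile_grid_indices_spec : Claim_equal_tile_grid_indices := by
  intro h_ w s _ hpre
  unfold Spec_tile_grid_indices tile_grid_indices tile_grid_indices_alt
  dsimp only
  rcases lt_or_gt_of_ne hpre with hneg | hpos
  · -- s < 0 : all ranges empty, both sides are ([], [], [0], [0])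
    have hh := pv_rem_nonpos h_ s hneg
    have hw := pv_rem_nonpos w s hneg
    rw [PySem.List.pyRange_one_eq_nil hh, PySem.List.pyRange_one_eq_nil hw,
        PySem.List.pyRange_one_eq_nil (le_of_lt hneg),
        PySem.List.pyRange_one_eq_nil (by omega : s ≤ 1)]
    have hnt : s.toNat = 0 := by omega
    simp [hnt, PySem.List.slice_to_neg_one]
  · -- s > 0
    have hhb := pv_rem_bounds h_ s hpos
    have hwb := pv_rem_bounds w s hpos
    rw [pv_heights_eq _ _ s hpos hhb.1 hhb.2, pv_heights_eq _ _ s hpos hwb.1 hwb.2,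
        PySem.List.slice_to_neg_one, PySem.List.slice_to_neg_one,
        pv_starts_eq _ _ s hpos hhb.1 hhb.2,
        pv_starts_eq _ _ s hpos hwb.1 hwb.2]
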